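-- pv_equiv track=rewrite | github.com/Touhau/TestIT-case | pars.py | get_pozneg_dict
-- ===== SOURCE A (Python) =====
-- def get_pozneg_dict(mas):
--     negpoz_dict = {}
--     light = True
--     temp_poz = []
--     temp_neg = []
--     for i in mas:
--         if i != 'Positive:' and i != 'Negative:' and light == True:
--             temp_poz.append(i)
--         elif i == 'Negative:':
--             light = False
--         elif i != 'Positive:' and i != 'Negative:' and light == False:
--             temp_neg.append(i)
--     negpoz_dict.update({'Positive': temp_poz})
--     if light == False:
--         negpoz_dict.update({'Negative': temp_neg})
--     return negpoz_dict
-- ===== SOURCE B (Python) =====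
-- def get_pozneg_dict(mas):
--     if 'Negative:' not in mas:
--         return {'Positive': [x for x in mas if x != 'Positive:']}
--     idx = mas.index('Negative:')
--     return {'Positive': [x for x in mas[:idx] if x != 'Positive:'],
--             'Negative': [x for x in mas[idx + 1:] if x != 'Positive:' and x != 'Negative:']}
-- ===== Notes on version B (the rewrite author's own statement) =====
-- stated objective: simpler
-- what changed: Replaces the flag-driven single pass with a boundary-finding step (first index of 'Negative:') followed by two filtered slice comprehensions.
import Mathlib
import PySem

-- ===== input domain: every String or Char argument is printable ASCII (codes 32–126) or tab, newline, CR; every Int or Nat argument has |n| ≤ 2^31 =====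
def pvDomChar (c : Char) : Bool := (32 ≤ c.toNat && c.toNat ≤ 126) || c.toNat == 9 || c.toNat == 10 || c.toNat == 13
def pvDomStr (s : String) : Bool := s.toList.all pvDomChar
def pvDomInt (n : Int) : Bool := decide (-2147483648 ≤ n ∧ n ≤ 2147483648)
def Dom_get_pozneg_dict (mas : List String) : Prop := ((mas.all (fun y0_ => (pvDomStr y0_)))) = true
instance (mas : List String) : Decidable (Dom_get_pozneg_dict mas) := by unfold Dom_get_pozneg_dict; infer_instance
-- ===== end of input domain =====

-- B replaces A's flag-driven single pass by finding the first 'Negative:' marker and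
-- filtering the two slices around it (objective: simpler decomposition; same cost).

-- ===== PORT A =====
-- A's loop body, step for step: the three if/elif branches over state (light, temp_poz, temp_neg)
def pvStepA (st : Bool × List String × List String) (i : String) : Bool × List String × List String :=
  if i ≠ "Positive:" ∧ i ≠ "Negative:" ∧ st.1 = true then (st.1, st.2.1 ++ [i], st.2.2)
  else if i = "Negative:" then (false, st.2.1, st.2.2)
  else if i ≠ "Positive:" ∧ i ≠ "Negative:" ∧ st.1 = false then (st.1, st.2.1, st.2.2 ++ [i])
  else st

def get_pozneg_dict (mas : List String) : List (String × List String) :=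
  let st := mas.foldl pvStepA (true, [], [])
  [("Positive", st.2.1)] ++ (if st.1 = false then [("Negative", st.2.2)] else [])

-- ===== PORT B =====
def get_pozneg_dict_alt (mas : List String) : List (String × List String) :=
  match PySem.List.index? mas "Negative:" with
  | none => [("Positive", mas.filter (fun x => x ≠ "Positive:"))]
  | some idx =>
      [("Positive", (PySem.List.slice mas none (some (idx : Int))).filter (fun x => x ≠ "Positive:")),
       ("Negative", (PySem.List.slice mas (some ((idx : Int) + 1)) none).filter
          (fun x => x ≠ "Positive:" ∧ x ≠ "Negative:"))]

-- ===== PRECONDITION & SPEC =====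
def Spec_get_pozneg_dict (mas : List String) (out : List (String × List String)) : Prop := out = get_pozneg_dict_alt mas
instance (mas : List String) (out : List (String × List String)) : Decidable (Spec_get_pozneg_dict mas out) := by unfold Spec_get_pozneg_dict; infer_instance

-- ===== CLAIM (what is proved, stated in full; the proofs are below) =====
def Claim_equal_get_pozneg_dict : Prop := ∀ (mas : List String), Dom_get_pozneg_dict mas → Spec_get_pozneg_dict mas (get_pozneg_dict mas)

-- ===== LEMMAS AND PROOFS =====

-- light = True mode: while no 'Negative:' marker is seen, A appends the non-'Positive:' elements
theorem pvFoldA_pos (l : List String) (p n : List String) (h : "Negative:" ∉ l) :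
    l.foldl pvStepA (true, p, n) = (true, p ++ l.filter (fun x => x ≠ "Positive:"), n) := by
  induction l generalizing p with
  | nil => simp
  | cons a l ih =>
      have ha : a ≠ "Negative:" := fun e => h (e ▸ List.mem_cons_self)
      have h' : "Negative:" ∉ l := fun hm => h (List.mem_cons_of_mem _ hm)
      by_cases hp : a = "Positive:"
      · simp [List.foldl_cons, pvStepA, hp, ih _ h']
      · simp [List.foldl_cons, pvStepA, hp, ha, ih _ h']

-- light = False mode: A appends exactly the non-marker elements to temp_neg
theorem pvFoldA_neg (l : List String) (p n : List String) :
    l.foldl pvStepA (false, p, n) = (false, p, n ++ l.filter (fun x => x ≠ "Positive:" ∧ x ≠ "Negative:")) := by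
  induction l generalizing n with
  | nil => simp
  | cons a l ih =>
      by_cases hn : a = "Negative:"
      · simp [List.foldl_cons, pvStepA, hn, ih]
      · by_cases hp : a = "Positive:"
        · simp [List.foldl_cons, pvStepA, hp, ih]
        · simp [List.foldl_cons, pvStepA, hp, hn, ih]

-- ===== VERDICT (by name: the statement is the Claim_ definition above) =====
theorem get_pozneg_dict_spec : Claim_equal_get_pozneg_dict := by
  intro mas _
  unfold Spec_get_pozneg_dict get_pozneg_dict get_pozneg_dict_alt
  rcases h : PySem.List.index? mas "Negative:" with _ | k
  · have hnm : "Negative:" ∉ mas := (PySem.List.index?_eq_none_iff mas _).1 h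
    simp [pvFoldA_pos mas [] [] hnm]
  · obtain ⟨pre, suf, hdecomp, hlen, hpre⟩ := (PySem.List.index?_eq_some_iff mas _ k).1 h
    subst hdecomp
    dsimp only
    rw [show ((k : Int) + 1) = (((k + 1 : Nat) : Int)) by push_cast; ring,
        PySem.List.slice_to_natCast, PySem.List.slice_from_natCast]
    have htake : (pre ++ "Negative:" :: suf).take k = pre := by
      rw [← hlen, List.take_left]
    have hdrop : (pre ++ "Negative:" :: suf).drop (k + 1) = suf := by
      rw [← hlen]
      simp [List.drop_append]
    rw [List.foldl_append, pvFoldA_pos pre [] [] hpre, List.foldl_cons]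
    have hstep : pvStepA (true, [] ++ pre.filter (fun x => x ≠ "Positive:"), []) "Negative:"
        = (false, pre.filter (fun x => x ≠ "Positive:"), []) := by
      simp [pvStepA]
    rw [hstep, pvFoldA_neg, htake, hdrop]
    simp
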